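-- pv_equiv track=rewrite | github.com/iskorini/AdventOfCode | 2020/Day11/part1.py | get_occupied_seats
-- ===== SOURCE A (Python) =====
-- FLOOR = '.'
--
-- OCCUPIED = '#'
--
-- EMPTY = 'L'
--
-- def get_occupied_seats(input):
--     occupied_counter = 0
--     changed = True
--     new_disposition = [row.copy() for row in input]
--     while changed:
--         changed = False
--         for x, row in enumerate(input):
--             for y, seat in enumerate(row):
--                 adj = get_adj(input, (x, y))
--                 if seat == EMPTY and OCCUPIED not in adj:
--                     new_disposition[x][y] = OCCUPIED
--                     changed = True
--                     occupied_counter += 1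
--                 elif seat == OCCUPIED and adj.count(OCCUPIED)>=4:
--                     new_disposition[x][y] = EMPTY
--                     changed = True
--                     occupied_counter -= 1
--         input = new_disposition
--         new_disposition = [row.copy() for row in input]
--     return occupied_counter
--
-- def get_adj(input, position):
--     adj = [FLOOR]*8
--     x, y = position
--     up_ok = x-1 >= 0
--     down_ok = x+1 < len(input)
--     right_ok = y+1 < len(input[x])
--     left_ok = y-1 >= 0
--     adj[0] = input[x-1][y] if up_ok else FLOOR
--     adj[1] = input[x+1][y] if down_ok else FLOOR
--     adj[2] = input[x][y-1] if left_ok else FLOOR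
--     adj[3] = input[x][y+1] if right_ok else FLOOR
--     adj[4] = input[x-1][y-1] if (up_ok and left_ok) else FLOOR
--     adj[5] = input[x-1][y+1] if (up_ok and right_ok) else FLOOR
--     adj[6] = input[x+1][y-1] if (down_ok and left_ok) else FLOOR
--     adj[7] = input[x+1][y+1] if (down_ok and right_ok) else FLOOR
--     return adj
-- ===== SOURCE B (Python) =====
-- FLOOR = '.'
--
-- OCCUPIED = '#'
--
-- EMPTY = 'L'
--
-- def get_occupied_seats(input):
--     # Occupied-neighbour counts by zero-padded shift-and-add convolution over zips
--     # (no indexing, no bounds tests), iterated to a fixed point; result is the net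
--     # change occupied(final) - occupied(initial).
--     def step(g):
--         ind = [[1 if c == OCCUPIED else 0 for c in row] for row in g]
--         h = [[a + b + c for a, b, c in zip([0] + r[:-1], r, r[1:] + [0])] for r in ind]
--         zero = [0] * (len(g[0]) if g else 0)
--         counts = [[a + b + c - s for a, b, c, s in zip(u, m, d, i)]
--                   for u, m, d, i in zip([zero] + h[:-1], h, h[1:] + [zero], ind)]
--         return [[OCCUPIED if cell == EMPTY and n == 0
--                  else EMPTY if cell == OCCUPIED and n >= 4
--                  else cell
--                  for cell, n in zip(row, cnt)]
--                 for row, cnt in zip(g, counts)]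
--
--     def occupied(g):
--         return sum(row.count(OCCUPIED) for row in g)
--
--     grid = input
--     while True:
--         nxt = step(grid)
--         if nxt == grid:
--             return occupied(grid) - occupied(input)
--         grid = nxt
-- ===== Notes on version B (the rewrite author's own statement) =====
-- stated objective: faster
-- what changed: Replaces A's per-cell get_adj neighbour gathering (an 8-element list built with explicit index bounds tests per cell) by a zero-padded shift-and-add convolution computed entirely with zips (horizontal triple-sum pass, then vertical combine pass, then a pointwise rule pass, no indexing anywhere), iterated as a pure step to a fixed point detected by grid equality, returning occupied(final) - occupied(initial) instead of A's incremental changed-flag counter; the zip passes avoid per-cell bounds checks and temporary list construction (measured ~2.3x).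
import Mathlib
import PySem

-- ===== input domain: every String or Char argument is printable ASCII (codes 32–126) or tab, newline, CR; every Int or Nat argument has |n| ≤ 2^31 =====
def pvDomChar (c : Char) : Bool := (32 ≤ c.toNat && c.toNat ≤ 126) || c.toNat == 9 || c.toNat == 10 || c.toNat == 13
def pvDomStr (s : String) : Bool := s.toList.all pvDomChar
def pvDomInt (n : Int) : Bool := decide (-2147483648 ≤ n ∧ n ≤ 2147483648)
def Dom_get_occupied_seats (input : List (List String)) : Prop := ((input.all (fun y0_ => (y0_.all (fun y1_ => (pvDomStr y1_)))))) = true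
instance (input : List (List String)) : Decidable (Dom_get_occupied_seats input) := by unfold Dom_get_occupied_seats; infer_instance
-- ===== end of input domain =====

-- B replaces A's per-cell indexed neighbour gathering by a zero-padded shift-and-add
-- convolution built from zips (no indexing), iterated as a pure step to a fixed point,
-- returning occupied(final) - occupied(initial); the zip passes avoid per-cell bounds checks (objective: faster, constant factor, measured).
-- Both loop ports carry the same generous fuel bound (the Python whiles are unbounded; the bound is a totality guard only).

-- fuel bound shared by both loop ports (a totality guard, not part of either algorithm)
def pvFuel (input : List (List String)) : Nat :=
  (input.length * (input.headD []).length + 2) * (input.length * (input.headD []).length + 2)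

-- ===== PORT A =====
def get_adj (input : List (List String)) (position : Int × Int) : List String :=
  let x := position.1
  let y := position.2
  let up_ok := 0 ≤ x - 1
  let down_ok := x + 1 < (input.length : Int)
  let right_ok := y + 1 < ((PySem.List.pyGetD input x []).length : Int)
  let left_ok := 0 ≤ y - 1
  let cell : Int → Int → String := fun i j => PySem.List.pyGetD (PySem.List.pyGetD input i []) j "."
  [ if up_ok then cell (x - 1) y else ".",
    if down_ok then cell (x + 1) y else ".",
    if left_ok then cell x (y - 1) else ".",
    if right_ok then cell x (y + 1) else ".",
    if up_ok ∧ left_ok then cell (x - 1) (y - 1) else ".",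
    if up_ok ∧ right_ok then cell (x - 1) (y + 1) else ".",
    if down_ok ∧ left_ok then cell (x + 1) (y - 1) else ".",
    if down_ok ∧ right_ok then cell (x + 1) (y + 1) else "." ]

-- new_disposition[x][y] = v
def pvSet2d (nd : List (List String)) (x y : Int) (v : String) : List (List String) :=
  PySem.List.pySetD nd x (PySem.List.pySetD (PySem.List.pyGetD nd x []) y v)

-- the inner 'for y, seat in enumerate(row)' loop; state = (new_disposition, changed, occupied_counter)
def pvInnerA (g : List (List String)) (x : Int) :
    List (Int × String) → List (List String) × Bool × Int → List (List String) × Bool × Int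
  | [], st => st
  | (y, seat) :: rest, (nd, chg, cnt) =>
    let adj := get_adj g (x, y)
    let st' :=
      if seat = "L" ∧ "#" ∉ adj then (pvSet2d nd x y "#", true, cnt + 1)
      else if seat = "#" ∧ 4 ≤ adj.count "#" then (pvSet2d nd x y "L", true, cnt - 1)
      else (nd, chg, cnt)
    pvInnerA g x rest st'

-- the outer 'for x, row in enumerate(input)' loop
def pvOuterA (g : List (List String)) :
    List (Int × List String) → List (List String) × Bool × Int → List (List String) × Bool × Int
  | [], st => st
  | (x, row) :: rest, st => pvOuterA g rest (pvInnerA g x (PySem.List.enumerate row 0) st)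

-- the 'while changed' loop (fuel = totality guard)
def pvWhileA : Nat → List (List String) → Int → Int
  | 0, _, cnt => cnt
  | n + 1, g, cnt =>
    match pvOuterA g (PySem.List.enumerate g 0) (g, false, cnt) with
    | (nd, chg, cnt') => if chg then pvWhileA n nd cnt' else cnt'

def get_occupied_seats (input : List (List String)) : Int :=
  pvWhileA (pvFuel input) input 0

-- ===== PORT B =====
-- zip(a, b, c) of int rows summed elementwise (zips truncate, as in Python)
def pvZip3I : List Int → List Int → List Int → List Int
  | a :: as, b :: bs, c :: cs => (a + b + c) :: pvZip3I as bs cs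
  | _, _, _ => []

-- zip(u, m, d, i) of int rows combined as u+m+d-i elementwise
def pvZip4I : List Int → List Int → List Int → List Int → List Int
  | a :: as, b :: bs, c :: cs, d :: ds => (a + b + c - d) :: pvZip4I as bs cs ds
  | _, _, _, _ => []

-- the row-level zip of the vertical combine pass
def pvZip4R : List (List Int) → List (List Int) → List (List Int) → List (List Int) → List (List Int)
  | u :: us, m :: ms, d :: ds, i :: is' => pvZip4I u m d i :: pvZip4R us ms ds is'
  | _, _, _, _ => []

-- [1 if c == OCCUPIED else 0 for c in row]
def pvIndRow (r : List String) : List Int := r.map (fun c => if c = "#" then (1 : Int) else 0)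

-- OCCUPIED if cell==EMPTY and n==0 else EMPTY if cell==OCCUPIED and n>=4 else cell
def pvRule (cell : String) (n : Int) : String :=
  if cell = "L" ∧ n = 0 then "#" else if cell = "#" ∧ 4 ≤ n then "L" else cell

def pvStepB (g : List (List String)) : List (List String) :=
  let ind := g.map pvIndRow
  let h := ind.map (fun r => pvZip3I ((0 : Int) :: r.dropLast) r (r.drop 1 ++ [0]))
  let zero : List Int := List.replicate (g.headD []).length 0   -- [0] * (len(g[0]) if g else 0)
  let counts := pvZip4R (zero :: h.dropLast) h (h.drop 1 ++ [zero]) ind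
  List.zipWith (fun row cnt => List.zipWith pvRule row cnt) g counts

-- sum(row.count(OCCUPIED) for row in g)
def pvCountOcc (g : List (List String)) : Int :=
  (g.map (fun row => (row.count "#" : Int))).sum

-- the 'while True' loop (fuel = totality guard)
def pvLoopB (input : List (List String)) : Nat → List (List String) → Int
  | 0, g => pvCountOcc g - pvCountOcc input
  | n + 1, g =>
    let new := pvStepB g
    if new = g then pvCountOcc g - pvCountOcc input else pvLoopB input n new

def get_occupied_seats_alt (input : List (List String)) : Int :=
  pvLoopB input (pvFuel input) input

-- ===== PRECONDITION & SPEC =====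
-- Pre_ excludes only crashes: on every ragged grid (rows of unequal length) A's get_adj
-- indexes a neighbouring row out of range and raises IndexError.
def Pre_get_occupied_seats (input : List (List String)) : Prop :=
  ∀ r ∈ input, r.length = (input.headD []).length
instance (input : List (List String)) : Decidable (Pre_get_occupied_seats input) := by
  unfold Pre_get_occupied_seats; infer_instance

def pvWitness_get_occupied_seats : List (List String) := [["L", "L"], ["L", "#"]]

def Spec_get_occupied_seats (input : List (List String)) (out : Int) : Prop := out = get_occupied_seats_alt input
instance (input : List (List String)) (out : Int) : Decidable (Spec_get_occupied_seats input out) := by unfold Spec_get_occupied_seats; infer_instance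

-- ===== CLAIM (what is proved, stated in full; the proofs are below) =====
def Claim_equal_get_occupied_seats : Prop := ∀ (input : List (List String)), Dom_get_occupied_seats input → Pre_get_occupied_seats input → Spec_get_occupied_seats input (get_occupied_seats input)

-- ===== LEMMAS AND PROOFS =====

-- proof-side mirror of A's per-cell rule: occupied-neighbour count and next state
def pvOccB (g : List (List String)) (x y : Int) : Int :=
  (([x - 1, x, x + 1] : List Int).flatMap (fun i =>
    ([y - 1, y, y + 1] : List Int).map (fun j =>
      if (¬(i = x ∧ j = y)) ∧ 0 ≤ i ∧ i < (g.length : Int) ∧ 0 ≤ j ∧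
          j < ((PySem.List.pyGetD g i []).length : Int) ∧
          PySem.List.pyGetD (PySem.List.pyGetD g i []) j "" = "#"
      then (1 : Int) else 0))).sum

def pvNxtB (g : List (List String)) (x y : Int) (seat : String) : String :=
  pvRule seat (pvOccB g x y)

-- the grid of next states, cell by cell (the reference semantics both ports are related to)
def pvRowStep (g : List (List String)) (x : Int) : Int → List String → List String
  | _, [] => []
  | k, s :: rest => pvNxtB g x k s :: pvRowStep g x (k + 1) rest

def pvGridStep (g : List (List String)) : Int → List (List String) → List (List String)
  | _, [] => []
  | k, row :: rest => pvRowStep g k 0 row :: pvGridStep g (k + 1) rest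

def pvOccRow (l : List String) : Int := (l.count "#" : Int)
def pvOccRows (rows : List (List String)) : Int := (rows.map pvOccRow).sum

-- zero-extended occupancy indicator at integer coordinates (0 outside the grid)
def pvIcell (g : List (List String)) (i j : Int) : Int :=
  if (0 ≤ i ∧ i < (g.length : Int) ∧ 0 ≤ j ∧ j < ((g.headD []).length : Int)) ∧
      PySem.List.pyGetD (PySem.List.pyGetD g i []) j "." = "#" then (1 : Int) else 0

-- row length lemma
theorem pvRowLen {g : List (List String)} (hg : ∀ r ∈ g, r.length = (g.headD []).length)
    {i : Nat} (hi : i < g.length) : (g.getD i []).length = (g.headD []).length := by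
  have : g.getD i [] ∈ g := by
    rw [List.getD_eq_getElem?_getD, List.getElem?_eq_getElem hi]
    exact List.getElem_mem hi
  exact hg _ this

-- one summand of pvOccB in canonical (pvIcell) form
theorem pvDirTerm (g : List (List String)) (hg : ∀ r ∈ g, r.length = (g.headD []).length)
    (P : Prop) [Decidable P] (hne : ¬P) (I J : Int) :
    (if (¬P) ∧ 0 ≤ I ∧ I < (g.length : Int) ∧ 0 ≤ J ∧
        J < ((PySem.List.pyGetD g I []).length : Int) ∧
        PySem.List.pyGetD (PySem.List.pyGetD g I []) J "" = "#" then (1 : Int) else 0)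
    = pvIcell g I J := by
  rw [pvIcell]
  by_cases hb : 0 ≤ I ∧ I < (g.length : Int)
  · have hI : I = ((I.toNat : Nat) : Int) := by omega
    rw [hI, PySem.List.pyGetD_natCast]
    have hlen : (g.getD I.toNat []).length = (g.headD []).length :=
      pvRowLen hg (by omega)
    by_cases hJ : 0 ≤ J ∧ J < ((g.headD []).length : Int)
    · have hJ' : J = ((J.toNat : Nat) : Int) := by omega
      rw [hJ']; simp only [PySem.List.pyGetD_natCast]
      have hJlt : J.toNat < (g.getD I.toNat []).length := by omega
      rw [List.getD_eq_getElem _ "." hJlt, List.getD_eq_getElem _ "" hJlt]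
      simp only [hlen]
      by_cases hc : (g.getD I.toNat [])[J.toNat] = "#"
      · rw [if_pos ⟨hne, by omega, by omega, by omega, by omega, hc⟩,
            if_pos ⟨⟨by omega, by omega, by omega, by omega⟩, hc⟩]
      · rw [if_neg (fun h => hc h.2.2.2.2.2), if_neg (fun h => hc h.2)]
    · rw [if_neg, if_neg]
      · rintro ⟨h1, -⟩; exact hJ ⟨h1.2.2.1, h1.2.2.2⟩
      · rw [hlen]; rintro ⟨-, -, -, h3, h4, -⟩; exact hJ ⟨h3, h4⟩
  · rw [if_neg, if_neg]
    · rintro ⟨h1, -⟩; exact hb ⟨h1.1, h1.2.1⟩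
    · rintro ⟨-, h1, h2, -⟩; exact hb ⟨h1, h2⟩

-- one entry of A's adj list, counted
theorem pvAEntry (G G' : Prop) [Decidable G] [Decidable G'] (h : G ↔ G') (c : String) :
    (if (if G then c else ".") = "#" then (1 : Int) else 0)
    = if G' ∧ c = "#" then (1 : Int) else 0 := by
  by_cases hG : G
  · simp [hG, h.mp hG]
  · have h2 : ¬(G' ∧ c = "#") := fun hh => hG (h.mpr hh.1)
    simp [hG, h2]

-- pvOccB expanded into the eight zero-extended neighbour indicators
theorem pvOccB_canon (g : List (List String)) (hg : ∀ r ∈ g, r.length = (g.headD []).length)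
    (x y : Nat) :
    pvOccB g ((x : Int)) ((y : Int))
      = pvIcell g ((x:Int)-1) ((y:Int)-1) + pvIcell g ((x:Int)-1) ((y:Int))
        + pvIcell g ((x:Int)-1) ((y:Int)+1) + pvIcell g ((x:Int)) ((y:Int)-1)
        + pvIcell g ((x:Int)) ((y:Int)+1) + pvIcell g ((x:Int)+1) ((y:Int)-1)
        + pvIcell g ((x:Int)+1) ((y:Int)) + pvIcell g ((x:Int)+1) ((y:Int)+1) := by
  simp only [pvOccB, List.flatMap_cons, List.flatMap_nil, List.map_cons, List.map_nil,
    List.append_nil, List.sum_append, List.sum_cons, List.sum_nil]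
  rw [pvDirTerm g hg ((x:Int)-1 = (x:Int) ∧ (y:Int)-1 = (y:Int)) (by intro h; omega) ((x:Int)-1) ((y:Int)-1),
      pvDirTerm g hg ((x:Int)-1 = (x:Int) ∧ True) (by intro h; omega) ((x:Int)-1) ((y:Int)),
      pvDirTerm g hg ((x:Int)-1 = (x:Int) ∧ (y:Int)+1 = (y:Int)) (by intro h; omega) ((x:Int)-1) ((y:Int)+1),
      pvDirTerm g hg (True ∧ (y:Int)-1 = (y:Int)) (by intro h; omega) ((x:Int)) ((y:Int)-1),
      pvDirTerm g hg (True ∧ (y:Int)+1 = (y:Int)) (by intro h; omega) ((x:Int)) ((y:Int)+1),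
      pvDirTerm g hg ((x:Int)+1 = (x:Int) ∧ (y:Int)-1 = (y:Int)) (by intro h; omega) ((x:Int)+1) ((y:Int)-1),
      pvDirTerm g hg ((x:Int)+1 = (x:Int) ∧ True) (by intro h; omega) ((x:Int)+1) ((y:Int)),
      pvDirTerm g hg ((x:Int)+1 = (x:Int) ∧ (y:Int)+1 = (y:Int)) (by intro h; omega) ((x:Int)+1) ((y:Int)+1)]
  have hmid : (if (¬(True ∧ True)) ∧ 0 ≤ (x:Int) ∧ (x:Int) < (g.length:Int) ∧ 0 ≤ (y:Int) ∧
      (y:Int) < ((PySem.List.pyGetD g ((x:Int)) []).length : Int) ∧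
      PySem.List.pyGetD (PySem.List.pyGetD g ((x:Int)) []) ((y:Int)) "" = "#" then (1:Int) else 0) = 0 :=
    if_neg (fun h => h.1 ⟨trivial, trivial⟩)
  rw [hmid]
  ring

-- pvOccB counts A's adjacency list
theorem pvAdjCount (g : List (List String)) (hg : ∀ r ∈ g, r.length = (g.headD []).length)
    (x y : Nat) (hx : x < g.length) (hy : y < (g.headD []).length) :
    pvOccB g ((x : Int)) ((y : Int)) = ((get_adj g ((x : Int), (y : Int))).count "#" : Int) := by
  have hW : ((PySem.List.pyGetD g ((x : Int)) []).length) = (g.headD []).length := by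
    rw [PySem.List.pyGetD_natCast]; exact pvRowLen hg hx
  rw [pvOccB_canon g hg x y]
  simp only [pvIcell]
  simp only [get_adj, List.count_cons, List.count_nil, beq_iff_eq, hW]
  push_cast
  rw [pvAEntry (0 ≤ (x:Int) - 1)
        (0 ≤ (x:Int)-1 ∧ (x:Int)-1 < (g.length:Int) ∧ 0 ≤ (y:Int) ∧ (y:Int) < ((g.headD []).length:Int))
        (by omega) (PySem.List.pyGetD (PySem.List.pyGetD g ((x:Int)-1) []) ((y:Int)) "."),
      pvAEntry ((x:Int) + 1 < (g.length:Int))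
        (0 ≤ (x:Int)+1 ∧ (x:Int)+1 < (g.length:Int) ∧ 0 ≤ (y:Int) ∧ (y:Int) < ((g.headD []).length:Int))
        (by omega) (PySem.List.pyGetD (PySem.List.pyGetD g ((x:Int)+1) []) ((y:Int)) "."),
      pvAEntry (0 ≤ (y:Int) - 1)
        (0 ≤ (x:Int) ∧ (x:Int) < (g.length:Int) ∧ 0 ≤ (y:Int)-1 ∧ (y:Int)-1 < ((g.headD []).length:Int))
        (by omega) (PySem.List.pyGetD (PySem.List.pyGetD g ((x:Int)) []) ((y:Int)-1) "."),
      pvAEntry ((y:Int) + 1 < ((g.headD []).length:Int))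
        (0 ≤ (x:Int) ∧ (x:Int) < (g.length:Int) ∧ 0 ≤ (y:Int)+1 ∧ (y:Int)+1 < ((g.headD []).length:Int))
        (by omega) (PySem.List.pyGetD (PySem.List.pyGetD g ((x:Int)) []) ((y:Int)+1) "."),
      pvAEntry (0 ≤ (x:Int) - 1 ∧ 0 ≤ (y:Int) - 1)
        (0 ≤ (x:Int)-1 ∧ (x:Int)-1 < (g.length:Int) ∧ 0 ≤ (y:Int)-1 ∧ (y:Int)-1 < ((g.headD []).length:Int))
        (by omega) (PySem.List.pyGetD (PySem.List.pyGetD g ((x:Int)-1) []) ((y:Int)-1) "."),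
      pvAEntry (0 ≤ (x:Int) - 1 ∧ (y:Int) + 1 < ((g.headD []).length:Int))
        (0 ≤ (x:Int)-1 ∧ (x:Int)-1 < (g.length:Int) ∧ 0 ≤ (y:Int)+1 ∧ (y:Int)+1 < ((g.headD []).length:Int))
        (by omega) (PySem.List.pyGetD (PySem.List.pyGetD g ((x:Int)-1) []) ((y:Int)+1) "."),
      pvAEntry ((x:Int) + 1 < (g.length:Int) ∧ 0 ≤ (y:Int) - 1)
        (0 ≤ (x:Int)+1 ∧ (x:Int)+1 < (g.length:Int) ∧ 0 ≤ (y:Int)-1 ∧ (y:Int)-1 < ((g.headD []).length:Int))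
        (by omega) (PySem.List.pyGetD (PySem.List.pyGetD g ((x:Int)+1) []) ((y:Int)-1) "."),
      pvAEntry ((x:Int) + 1 < (g.length:Int) ∧ (y:Int) + 1 < ((g.headD []).length:Int))
        (0 ≤ (x:Int)+1 ∧ (x:Int)+1 < (g.length:Int) ∧ 0 ≤ (y:Int)+1 ∧ (y:Int)+1 < ((g.headD []).length:Int))
        (by omega) (PySem.List.pyGetD (PySem.List.pyGetD g ((x:Int)+1) []) ((y:Int)+1) ".")]
  ring

-- generic list helpers
theorem pvDropSet {α : Type} (l : List α) (k : Nat) (v : α) :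
    (l.set k v).drop (k + 1) = l.drop (k + 1) := by
  induction l generalizing k with
  | nil => simp
  | cons a t ih => cases k with
    | zero => simp
    | succ m => simpa using ih m

theorem pvSetOutOfTake {α : Type} (l : List α) (k : Nat) (v : α) :
    (List.take k l).set k v = List.take k l :=
  List.set_eq_of_length_le (by simp)

theorem pvTakeSet {α : Type} (l : List α) (k : Nat) (v : α) (h : k < l.length) :
    (l.set k v).take (k + 1) = l.take k ++ [v] := by
  rw [List.take_succ]; simp [h, List.take_set, pvSetOutOfTake]

theorem pvGetDSet {α : Type} (l : List α) (k : Nat) (v d : α) (h : k < l.length) :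
    (l.set k v).getD k d = v := by
  rw [List.getD_eq_getElem _ _ (by simpa using h)]; simp

theorem pvSetSelf {α : Type} (l : List α) (k : Nat) (d : α) {v : α} (h : k < l.length)
    (hv : l.getD k d = v) : l.set k v = l := by
  subst hv; rw [List.getD_eq_getElem _ _ h]; exact List.set_getElem_self h

theorem pvInnerSpec (g : List (List String)) (hg : ∀ r ∈ g, r.length = (g.headD []).length)
    (x : Nat) (hx : x < g.length) :
    ∀ (suffix : List String) (k : Nat) (nd : List (List String)) (r : List String)
      (chg : Bool) (cnt : Int),
      nd.length = g.length →
      nd.getD x [] = r →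
      r.length = (g.headD []).length →
      r.drop k = suffix →
      (g.getD x []).drop k = suffix →
      pvInnerA g (x : Int) (PySem.List.enumerate suffix (k : Int)) (nd, chg, cnt)
        = (nd.set x (r.take k ++ pvRowStep g (x : Int) (k : Int) suffix),
           chg || decide (pvRowStep g (x : Int) (k : Int) suffix ≠ suffix),
           cnt + pvOccRow (pvRowStep g (x : Int) (k : Int) suffix) - pvOccRow suffix) := by
  intro suffix
  induction suffix with
  | nil =>
    intro k nd r chg cnt hndlen hndx hrlen hrdrop hgdrop
    have hkr : r.length ≤ k := by
      by_contra h
      have := List.drop_eq_getElem_cons (l := r) (i := k) (by omega)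
      rw [hrdrop] at this; simp at this; omega
    rw [PySem.List.enumerate_nil]
    simp only [pvInnerA, pvRowStep, pvOccRow, List.count_nil]
    rw [List.take_of_length_le hkr, List.append_nil,
        pvSetSelf nd x [] (by omega) hndx]
    simp
  | cons s rest ih =>
    intro k nd r chg cnt hndlen hndx hrlen hrdrop hgdrop
    have hy : k < (g.getD x []).length := by
      by_contra h
      rw [List.drop_eq_nil_of_le (by omega)] at hgdrop; simp at hgdrop
    have hyW : k < (g.headD []).length := by rwa [pvRowLen hg hx] at hy
    have hkr : k < r.length := by omega
    have hrk : r[k] = s ∧ r.drop (k + 1) = rest :=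
      List.cons_eq_cons.mp ((List.drop_eq_getElem_cons (l := r) (i := k) hkr).symm.trans hrdrop)
    have hgk : (g.getD x []).drop (k + 1) = rest :=
      (List.cons_eq_cons.mp ((List.drop_eq_getElem_cons (l := g.getD x []) (i := k) hy).symm.trans
        hgdrop)).2
    have hadj := pvAdjCount g hg x k hx hyW
    have hm : ("#" ∉ get_adj g ((x : Int), (k : Int))) ↔ pvOccB g ((x : Int)) ((k : Int)) = 0 := by
      rw [hadj, Int.natCast_eq_zero, List.count_eq_zero]
    have h4c : (4 ≤ pvOccB g ((x : Int)) ((k : Int))) ↔ 4 ≤ (get_adj g ((x : Int), (k : Int))).count "#" := by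
      rw [hadj]; exact_mod_cast Iff.rfl
    have hcast : ((k : Int) + 1) = (((k + 1 : Nat)) : Int) := by push_cast; ring
    rw [PySem.List.enumerate_cons, hcast]
    simp only [pvInnerA]
    by_cases h1 : s = "L" ∧ "#" ∉ get_adj g ((x : Int), (k : Int))
    · rw [if_pos h1]
      have hocc : pvOccB g ((x : Int)) ((k : Int)) = 0 := hm.mp h1.2
      have hnxt : pvNxtB g ((x : Int)) ((k : Int)) s = "#" := by
        simp [pvNxtB, pvRule, h1.1, hocc]
      have hset : pvSet2d nd ((x : Int)) ((k : Int)) "#" = nd.set x (r.set k "#") := by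
        simp [pvSet2d, ← List.getD_eq_getElem?_getD, hndx]
      rw [hset, ih (k + 1) (nd.set x (r.set k "#")) (r.set k "#") true (cnt + 1)
            (by simpa using hndlen)
            (pvGetDSet nd x (r.set k "#") [] (by omega))
            (by simpa using hrlen)
            (by rw [pvDropSet]; exact hrk.2) hgk]
      have hrow : pvRowStep g ((x : Int)) ((k : Int)) (s :: rest)
          = "#" :: pvRowStep g ((x : Int)) (((k + 1 : Nat) : Int)) rest := by
        simp only [pvRowStep, hnxt, hcast]
      simp only [Prod.mk.injEq]
      refine ⟨?_, ?_, ?_⟩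
      · rw [List.set_set, pvTakeSet _ _ _ hkr, hrow]
        simp [List.append_assoc]
      · rw [hrow]
        simp only [Bool.true_or]
        have : ("#" :: pvRowStep g ((x : Int)) (((k + 1 : Nat) : Int)) rest) ≠ s :: rest := by
          rw [h1.1]; intro h; exact absurd (List.cons_eq_cons.mp h).1 (by decide)
        rw [decide_eq_true this, Bool.or_true]
      · rw [hrow]
        simp only [pvOccRow, List.count_cons, h1.1]
        push_cast
        simp
        ring
    · rw [if_neg h1]
      by_cases h2 : s = "#" ∧ 4 ≤ (get_adj g ((x : Int), (k : Int))).count "#"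
      · rw [if_pos h2]
        have hocc : 4 ≤ pvOccB g ((x : Int)) ((k : Int)) := h4c.mpr h2.2
        have hnxt : pvNxtB g ((x : Int)) ((k : Int)) s = "L" := by
          have : ¬(s = "L" ∧ pvOccB g ((x : Int)) ((k : Int)) = 0) := by
            rintro ⟨hs, -⟩; rw [hs] at h2; simp at h2
          simp [pvNxtB, pvRule, this, h2.1, hocc]
        have hset : pvSet2d nd ((x : Int)) ((k : Int)) "L" = nd.set x (r.set k "L") := by
          simp [pvSet2d, ← List.getD_eq_getElem?_getD, hndx]
        rw [hset, ih (k + 1) (nd.set x (r.set k "L")) (r.set k "L") true (cnt - 1)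
              (by simpa using hndlen)
              (pvGetDSet nd x (r.set k "L") [] (by omega))
              (by simpa using hrlen)
              (by rw [pvDropSet]; exact hrk.2) hgk]
        have hrow : pvRowStep g ((x : Int)) ((k : Int)) (s :: rest)
            = "L" :: pvRowStep g ((x : Int)) (((k + 1 : Nat) : Int)) rest := by
          simp only [pvRowStep, hnxt, hcast]
        simp only [Prod.mk.injEq]
        refine ⟨?_, ?_, ?_⟩
        · rw [List.set_set, pvTakeSet _ _ _ hkr, hrow]
          simp [List.append_assoc]
        · rw [hrow]
          simp only [Bool.true_or]
          have : ("L" :: pvRowStep g ((x : Int)) (((k + 1 : Nat) : Int)) rest) ≠ s :: rest := by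
            rw [h2.1]; intro h; exact absurd (List.cons_eq_cons.mp h).1 (by decide)
          rw [decide_eq_true this, Bool.or_true]
        · rw [hrow]
          simp only [pvOccRow, List.count_cons, h2.1]
          push_cast
          simp
          ring
      · rw [if_neg h2]
        have hnxt : pvNxtB g ((x : Int)) ((k : Int)) s = s := by
          have hn1 : ¬(s = "L" ∧ pvOccB g ((x : Int)) ((k : Int)) = 0) := by
            rintro ⟨hs, ho⟩; exact h1 ⟨hs, hm.mpr ho⟩
          have hn2 : ¬(s = "#" ∧ 4 ≤ pvOccB g ((x : Int)) ((k : Int))) := by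
            rintro ⟨hs, ho⟩; exact h2 ⟨hs, h4c.mp ho⟩
          simp [pvNxtB, pvRule, hn1, hn2]
        rw [ih (k + 1) nd r chg cnt hndlen hndx hrlen
              (by rw [← hrk.2]) hgk]
        have hrow : pvRowStep g ((x : Int)) ((k : Int)) (s :: rest)
            = s :: pvRowStep g ((x : Int)) (((k + 1 : Nat) : Int)) rest := by
          simp only [pvRowStep, hnxt, hcast]
        simp only [Prod.mk.injEq]
        refine ⟨?_, ?_, ?_⟩
        · rw [hrow, List.take_succ]
          simp [hkr, hrk.1, List.append_assoc]
        · rw [hrow]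
          simp
        · rw [hrow]
          simp only [pvOccRow, List.count_cons]
          push_cast
          ring

theorem pvOuterSpec (g : List (List String)) (hg : ∀ r ∈ g, r.length = (g.headD []).length) :
    ∀ (suffix : List (List String)) (k : Nat) (nd : List (List String)) (chg : Bool) (cnt : Int),
      nd.length = g.length →
      nd.drop k = suffix →
      g.drop k = suffix →
      pvOuterA g (PySem.List.enumerate suffix (k : Int)) (nd, chg, cnt)
        = (nd.take k ++ pvGridStep g (k : Int) suffix,
           chg || decide (pvGridStep g (k : Int) suffix ≠ suffix),
           cnt + pvOccRows (pvGridStep g (k : Int) suffix) - pvOccRows suffix) := by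
  intro suffix
  induction suffix with
  | nil =>
    intro k nd chg cnt hndlen hnddrop hgdrop
    have hk : nd.length ≤ k := by
      by_contra h
      have := List.drop_eq_getElem_cons (l := nd) (i := k) (by omega)
      rw [hnddrop] at this; simp at this; omega
    rw [PySem.List.enumerate_nil]
    simp only [pvOuterA, pvGridStep, pvOccRows]
    rw [List.take_of_length_le hk, List.append_nil]
    simp
  | cons row rest ih =>
    intro k nd chg cnt hndlen hnddrop hgdrop
    have hk : k < g.length := by
      by_contra h
      rw [List.drop_eq_nil_of_le (by omega)] at hgdrop; simp at hgdrop
    have hknd : k < nd.length := by omega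
    have hgk : g[k] = row ∧ g.drop (k + 1) = rest :=
      List.cons_eq_cons.mp ((List.drop_eq_getElem_cons (l := g) (i := k) hk).symm.trans hgdrop)
    have hndk : nd[k] = row ∧ nd.drop (k + 1) = rest :=
      List.cons_eq_cons.mp ((List.drop_eq_getElem_cons (l := nd) (i := k) hknd).symm.trans hnddrop)
    have hrowmem : row ∈ g := hgk.1 ▸ List.getElem_mem hk
    have hrowlen : row.length = (g.headD []).length := hg row hrowmem
    have hcast : ((k : Int) + 1) = (((k + 1 : Nat)) : Int) := by push_cast; ring
    rw [PySem.List.enumerate_cons, hcast]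
    simp only [pvOuterA]
    have hinner := pvInnerSpec g hg k hk row 0 nd row chg cnt hndlen
      (by rw [List.getD_eq_getElem _ _ (by omega)]; exact hndk.1) hrowlen
      (by simp) (by rw [List.getD_eq_getElem _ _ (by omega)]; exact hgk.1)
    rw [show ((0 : Nat) : Int) = (0 : Int) by simp] at hinner
    rw [hinner]
    rw [ih (k + 1) (nd.set k (List.take 0 row ++ pvRowStep g (k : Int) 0 row))
          (chg || decide (pvRowStep g (k : Int) 0 row ≠ row))
          (cnt + pvOccRow (pvRowStep g (k : Int) 0 row) - pvOccRow row)
          (by simpa using hndlen)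
          (by rw [pvDropSet]; exact hndk.2) hgk.2]
    have hgrow : pvGridStep g ((k : Int)) (row :: rest)
        = pvRowStep g (k : Int) 0 row :: pvGridStep g (((k + 1 : Nat)) : Int) rest := by
      simp only [pvGridStep, hcast]
    simp only [Prod.mk.injEq]
    refine ⟨?_, ?_, ?_⟩
    · rw [hgrow]
      have h0 : List.take 0 row ++ pvRowStep g ((k : Int)) 0 row = pvRowStep g ((k : Int)) 0 row := by
        simp
      rw [h0, pvTakeSet _ _ _ hknd]
      simp [List.append_assoc]
    · rw [hgrow]
      by_cases e1 : pvRowStep g ((k : Int)) 0 row = row <;>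
        by_cases e2 : pvGridStep g (((k + 1 : Nat)) : Int) rest = rest <;>
        simp [e1, e2, List.cons_eq_cons, Bool.or_assoc]
    · rw [hgrow]
      simp only [pvOccRows, List.map_cons, List.sum_cons, List.take_nil, List.nil_append]
      ring

-- ===== convolution side: lengths and elementwise values of the zip pipeline =====

-- proof-side names for pvStepB's intermediate lists
def pvHG (g : List (List String)) : List (List Int) :=
  (g.map pvIndRow).map (fun r => pvZip3I ((0 : Int) :: r.dropLast) r (r.drop 1 ++ [0]))

def pvCountsG (g : List (List String)) : List (List Int) :=
  pvZip4R (List.replicate (g.headD []).length 0 :: (pvHG g).dropLast) (pvHG g)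
    ((pvHG g).drop 1 ++ [List.replicate (g.headD []).length 0]) (g.map pvIndRow)

theorem pvStepB_def (g : List (List String)) :
    pvStepB g = List.zipWith (fun row cnt => List.zipWith pvRule row cnt) g (pvCountsG g) := rfl

theorem pvZip3I_length (a b c : List Int) :
    (pvZip3I a b c).length = min a.length (min b.length c.length) := by
  induction a generalizing b c with
  | nil => simp [pvZip3I]
  | cons x xs ih =>
    cases b with
    | nil => simp [pvZip3I]
    | cons y ys =>
      cases c with
      | nil => simp [pvZip3I]
      | cons z zs => simp [pvZip3I, ih]

theorem pvZip3I_getD (a b c : List Int) (i : Nat)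
    (ha : i < a.length) (hb : i < b.length) (hc : i < c.length) :
    (pvZip3I a b c).getD i 0 = a.getD i 0 + b.getD i 0 + c.getD i 0 := by
  induction a generalizing b c i with
  | nil => simp at ha
  | cons x xs ih =>
    cases b with
    | nil => simp at hb
    | cons y ys =>
      cases c with
      | nil => simp at hc
      | cons z zs =>
        cases i with
        | zero => simp [pvZip3I]
        | succ m =>
          simp only [pvZip3I, List.getD_cons_succ]
          exact ih ys zs m (by simpa using ha) (by simpa using hb) (by simpa using hc)

theorem pvZip4I_length (a b c d : List Int) :
    (pvZip4I a b c d).length = min (min a.length b.length) (min c.length d.length) := by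
  induction a generalizing b c d with
  | nil => simp [pvZip4I]
  | cons x xs ih =>
    cases b with
    | nil => simp [pvZip4I]
    | cons y ys =>
      cases c with
      | nil => simp [pvZip4I]
      | cons z zs =>
        cases d with
        | nil => simp [pvZip4I]
        | cons w ws => simp [pvZip4I, ih]

theorem pvZip4I_getD (a b c d : List Int) (i : Nat)
    (ha : i < a.length) (hb : i < b.length) (hc : i < c.length) (hd : i < d.length) :
    (pvZip4I a b c d).getD i 0 = a.getD i 0 + b.getD i 0 + c.getD i 0 - d.getD i 0 := by
  induction a generalizing b c d i with
  | nil => simp at ha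
  | cons x xs ih =>
    cases b with
    | nil => simp at hb
    | cons y ys =>
      cases c with
      | nil => simp at hc
      | cons z zs =>
        cases d with
        | nil => simp at hd
        | cons w ws =>
          cases i with
          | zero => simp [pvZip4I]
          | succ m =>
            simp only [pvZip4I, List.getD_cons_succ]
            exact ih ys zs ws m (by simpa using ha) (by simpa using hb)
              (by simpa using hc) (by simpa using hd)

theorem pvZip4R_length (a b c d : List (List Int)) :
    (pvZip4R a b c d).length = min (min a.length b.length) (min c.length d.length) := by
  induction a generalizing b c d with
  | nil => simp [pvZip4R]
  | cons x xs ih =>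
    cases b with
    | nil => simp [pvZip4R]
    | cons y ys =>
      cases c with
      | nil => simp [pvZip4R]
      | cons z zs =>
        cases d with
        | nil => simp [pvZip4R]
        | cons w ws => simp [pvZip4R, ih]

theorem pvZip4R_getD (a b c d : List (List Int)) (i : Nat)
    (ha : i < a.length) (hb : i < b.length) (hc : i < c.length) (hd : i < d.length) :
    (pvZip4R a b c d).getD i [] = pvZip4I (a.getD i []) (b.getD i []) (c.getD i []) (d.getD i []) := by
  induction a generalizing b c d i with
  | nil => simp at ha
  | cons x xs ih =>
    cases b with
    | nil => simp at hb
    | cons y ys =>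
      cases c with
      | nil => simp at hc
      | cons z zs =>
        cases d with
        | nil => simp at hd
        | cons w ws =>
          cases i with
          | zero => simp [pvZip4R]
          | succ m =>
            simp only [pvZip4R, List.getD_cons_succ]
            exact ih ys zs ws m (by simpa using ha) (by simpa using hb)
              (by simpa using hc) (by simpa using hd)

-- the left zero-pad [p] + r[:-1], read at index y
theorem pvPadL_getD {α : Type} (p d : α) (r : List α) (y : Nat) (hy : y < r.length) :
    (p :: r.dropLast).getD y d = if y = 0 then p else r.getD (y - 1) d := by
  cases y with
  | zero => simp
  | succ m =>
    have hm : m < r.dropLast.length := by simp [List.length_dropLast]; omega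
    rw [List.getD_cons_succ, List.getD_eq_getElem _ _ hm, List.getElem_dropLast,
        if_neg (by omega), List.getD_eq_getElem _ _ (by omega)]
    simp

-- the right zero-pad r[1:] + [p], read at index y
theorem pvPadR_getD {α : Type} (p d : α) (r : List α) (y : Nat) (hy : y < r.length) :
    (r.drop 1 ++ [p]).getD y d = if y + 1 < r.length then r.getD (y + 1) d else p := by
  by_cases h : y + 1 < r.length
  · have hy' : y < (r.drop 1).length := by simp; omega
    rw [if_pos h, List.getD_append _ _ _ _ hy', List.getD_eq_getElem _ _ hy',
        List.getElem_drop, List.getD_eq_getElem _ _ (by omega)]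
    simp [Nat.add_comm]
  · rw [if_neg h, List.getD_append_right _ _ _ _ (by simp; omega)]
    simp only [List.length_drop]
    rw [show y - (r.length - 1) = 0 from by omega]
    rfl

theorem pvIcell_out (g : List (List String)) (i j : Int)
    (h : ¬(0 ≤ i ∧ i < (g.length : Int) ∧ 0 ≤ j ∧ j < ((g.headD []).length : Int))) :
    pvIcell g i j = 0 :=
  if_neg (fun hh => h hh.1)

-- the indicator row read in range is the zero-extended indicator
theorem pvInd_getD (g : List (List String)) (hg : ∀ r ∈ g, r.length = (g.headD []).length)
    (x y : Nat) (hx : x < g.length) (hy : y < (g.headD []).length) :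
    (pvIndRow (g.getD x [])).getD y 0 = pvIcell g ((x : Int)) ((y : Int)) := by
  have hyr : y < (g.getD x []).length := by rw [pvRowLen hg hx]; omega
  have hlhs : (pvIndRow (g.getD x [])).getD y 0
      = if (g.getD x []).getD y "." = "#" then (1 : Int) else 0 := by
    rw [pvIndRow, List.getD_eq_getElem _ _ (by simpa using hyr), List.getElem_map,
        List.getD_eq_getElem _ _ hyr]
  rw [hlhs, pvIcell]
  have hxc : ((x : Int)) = ((x : Nat) : Int) := rfl
  rw [PySem.List.pyGetD_natCast, PySem.List.pyGetD_natCast]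
  by_cases hc : (g.getD x []).getD y "." = "#"
  · rw [if_pos hc, if_pos ⟨⟨by omega, by omega, by omega, by omega⟩, hc⟩]
  · rw [if_neg hc, if_neg (fun h => hc h.2)]

-- the horizontal pass read in range
theorem pvHG_getD (g : List (List String)) (hg : ∀ r ∈ g, r.length = (g.headD []).length)
    (x : Nat) (hx : x < g.length) :
    (pvHG g).getD x []
      = pvZip3I ((0 : Int) :: (pvIndRow (g.getD x [])).dropLast) (pvIndRow (g.getD x []))
          ((pvIndRow (g.getD x [])).drop 1 ++ [0]) := by
  have h1 : x < (g.map pvIndRow).length := by simpa using hx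
  rw [pvHG, List.getD_eq_getElem _ _ (by simpa using h1), List.getElem_map, List.getElem_map]
  congr 1 <;> rw [List.getD_eq_getElem _ _ hx]

theorem pvIndRow_length (g : List (List String)) (hg : ∀ r ∈ g, r.length = (g.headD []).length)
    (x : Nat) (hx : x < g.length) :
    (pvIndRow (g.getD x [])).length = (g.headD []).length := by
  rw [pvIndRow, List.length_map]; exact pvRowLen hg hx

theorem pvHG_row_length (g : List (List String)) (hg : ∀ r ∈ g, r.length = (g.headD []).length)
    (x : Nat) (hx : x < g.length) :
    ((pvHG g).getD x []).length = (g.headD []).length := by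
  have hr := pvIndRow_length g hg x hx
  rw [pvHG_getD g hg x hx, pvZip3I_length]
  simp only [List.length_cons, List.length_dropLast, List.length_append,
    List.length_drop, List.length_nil, hr]
  omega

theorem pvHG_length (g : List (List String)) : (pvHG g).length = g.length := by
  simp [pvHG]

-- h[x][y] = the three zero-extended indicators of row x around column y
theorem pvHG_val (g : List (List String)) (hg : ∀ r ∈ g, r.length = (g.headD []).length)
    (x y : Nat) (hx : x < g.length) (hy : y < (g.headD []).length) :
    ((pvHG g).getD x []).getD y 0
      = pvIcell g ((x : Int)) ((y : Int) - 1) + pvIcell g ((x : Int)) ((y : Int))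
        + pvIcell g ((x : Int)) ((y : Int) + 1) := by
  have hr := pvIndRow_length g hg x hx
  rw [pvHG_getD g hg x hx,
      pvZip3I_getD _ _ _ y
        (by simp only [List.length_cons, List.length_dropLast]; omega) (by omega)
        (by simp only [List.length_append, List.length_drop, List.length_cons, List.length_nil]; omega),
      pvPadL_getD _ _ _ _ (by omega), pvPadR_getD _ _ _ _ (by omega),
      pvInd_getD g hg x y hx hy]
  have hL : (if y = 0 then (0 : Int) else (pvIndRow (g.getD x [])).getD (y - 1) 0)
      = pvIcell g ((x : Int)) ((y : Int) - 1) := by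
    by_cases h0 : y = 0
    · subst h0
      rw [if_pos rfl, pvIcell_out g _ _ (by intro h; omega)]
    · rw [if_neg h0, pvInd_getD g hg x (y - 1) hx (by omega)]
      congr 1
      omega
  have hR : (if y + 1 < (pvIndRow (g.getD x [])).length
        then (pvIndRow (g.getD x [])).getD (y + 1) 0 else (0 : Int))
      = pvIcell g ((x : Int)) ((y : Int) + 1) := by
    rw [hr]
    by_cases h1 : y + 1 < (g.headD []).length
    · rw [if_pos h1, pvInd_getD g hg x (y + 1) hx h1, Nat.cast_add, Nat.cast_one]
    · rw [if_neg h1, pvIcell_out g _ _ (by intro h; omega)]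
  rw [hL, hR]

theorem pvCountsG_length (g : List (List String)) : (pvCountsG g).length = g.length := by
  rw [pvCountsG, pvZip4R_length]
  simp [pvHG_length]
  omega

-- counts[x][y] is A's occupied-neighbour count
theorem pvCountsG_row (g : List (List String)) (hg : ∀ r ∈ g, r.length = (g.headD []).length)
    (x : Nat) (hx : x < g.length) :
    ((pvCountsG g).getD x []).length = (g.headD []).length ∧
    ∀ y : Nat, y < (g.headD []).length →
      ((pvCountsG g).getD x []).getD y 0 = pvOccB g ((x : Int)) ((y : Int)) := by
  have hHlen : (pvHG g).length = g.length := pvHG_length g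
  have hrow : ∀ z : Nat, z < g.length → ((pvHG g).getD z []).length = (g.headD []).length :=
    fun z hz => pvHG_row_length g hg z hz
  have hU : (List.replicate (g.headD []).length (0 : Int) :: (pvHG g).dropLast).getD x []
      = if x = 0 then List.replicate (g.headD []).length (0 : Int) else (pvHG g).getD (x - 1) [] :=
    pvPadL_getD _ _ _ _ (by omega)
  have hD : ((pvHG g).drop 1 ++ [List.replicate (g.headD []).length (0 : Int)]).getD x []
      = if x + 1 < (pvHG g).length then (pvHG g).getD (x + 1) []
        else List.replicate (g.headD []).length (0 : Int) :=
    pvPadR_getD _ _ _ _ (by omega)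
  have hZ : pvCountsG g = pvZip4R _ _ _ _ := rfl
  have hget : (pvCountsG g).getD x []
      = pvZip4I ((List.replicate (g.headD []).length (0 : Int) :: (pvHG g).dropLast).getD x [])
          ((pvHG g).getD x [])
          (((pvHG g).drop 1 ++ [List.replicate (g.headD []).length (0 : Int)]).getD x [])
          ((g.map pvIndRow).getD x []) := by
    rw [pvCountsG]
    exact pvZip4R_getD _ _ _ _ x (by simp [hHlen]; omega) (by omega)
      (by simp [hHlen]; omega) (by simpa using hx)
  have hIndx : (g.map pvIndRow).getD x [] = pvIndRow (g.getD x []) := by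
    rw [List.getD_eq_getElem _ _ (by simpa using hx), List.getElem_map,
        List.getD_eq_getElem _ _ hx]
  -- lengths of the four rows fed to pvZip4I
  have hUlen : ((List.replicate (g.headD []).length (0 : Int) :: (pvHG g).dropLast).getD x []).length
      = (g.headD []).length := by
    rw [hU]
    by_cases h0 : x = 0
    · simp [h0]
    · rw [if_neg h0]; exact hrow (x - 1) (by omega)
  have hDlen : (((pvHG g).drop 1 ++ [List.replicate (g.headD []).length (0 : Int)]).getD x []).length
      = (g.headD []).length := by
    rw [hD]
    by_cases h1 : x + 1 < (pvHG g).length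
    · rw [if_pos h1]; exact hrow (x + 1) (by omega)
    · simp [h1]
  have hMlen : ((pvHG g).getD x []).length = (g.headD []).length := hrow x hx
  have hIlen : ((g.map pvIndRow).getD x []).length = (g.headD []).length := by
    rw [hIndx]; exact pvIndRow_length g hg x hx
  constructor
  · rw [hget, pvZip4I_length, hUlen, hDlen, hMlen, hIlen]
    omega
  · intro y hy
    rw [hget, pvZip4I_getD _ _ _ _ y (by omega) (by omega) (by omega) (by omega)]
    have hUval : ((List.replicate (g.headD []).length (0 : Int) :: (pvHG g).dropLast).getD x []).getD y 0
        = pvIcell g ((x : Int) - 1) ((y : Int) - 1) + pvIcell g ((x : Int) - 1) ((y : Int))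
          + pvIcell g ((x : Int) - 1) ((y : Int) + 1) := by
      rw [hU]
      by_cases h0 : x = 0
      · subst h0
        rw [if_pos rfl, List.getD_eq_getElem _ _ (by simpa using hy), List.getElem_replicate,
            pvIcell_out g _ _ (by intro h; omega), pvIcell_out g _ _ (by intro h; omega),
            pvIcell_out g _ _ (by intro h; omega)]
        ring
      · rw [if_neg h0, pvHG_val g hg (x - 1) y (by omega) hy]
        have e : (((x - 1 : Nat)) : Int) = (x : Int) - 1 := by omega
        rw [e]
    have hDval : (((pvHG g).drop 1 ++ [List.replicate (g.headD []).length (0 : Int)]).getD x []).getD y 0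
        = pvIcell g ((x : Int) + 1) ((y : Int) - 1) + pvIcell g ((x : Int) + 1) ((y : Int))
          + pvIcell g ((x : Int) + 1) ((y : Int) + 1) := by
      rw [hD, hHlen]
      by_cases h1 : x + 1 < g.length
      · rw [if_pos h1, pvHG_val g hg (x + 1) y h1 hy]
        have e : (((x + 1 : Nat)) : Int) = (x : Int) + 1 := by push_cast; ring
        rw [e]
      · rw [if_neg h1, List.getD_eq_getElem _ _ (by simpa using hy), List.getElem_replicate,
            pvIcell_out g _ _ (by intro h; omega), pvIcell_out g _ _ (by intro h; omega),
            pvIcell_out g _ _ (by intro h; omega)]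
        ring
    rw [hUval, hDval, pvHG_val g hg x y hx hy, hIndx, pvInd_getD g hg x y hx hy,
        pvOccB_canon g hg x y]
    ring

-- ===== the step functions agree on rectangular grids =====

theorem pvRowStep_length (g : List (List String)) (x : Int) :
    ∀ (row : List String) (k : Int), (pvRowStep g x k row).length = row.length := by
  intro row
  induction row with
  | nil => intro k; rfl
  | cons s rest ih => intro k; simp [pvRowStep, ih]

theorem pvGridStep_length (g : List (List String)) :
    ∀ (s : List (List String)) (k : Int), (pvGridStep g k s).length = s.length := by
  intro s
  induction s with
  | nil => intro k; rfl
  | cons row rest ih => intro k; simp [pvGridStep, ih]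

theorem pvRowStep_getD (g : List (List String)) (x : Int) :
    ∀ (row : List String) (k j : Nat), j < row.length →
      (pvRowStep g x ((k : Int)) row).getD j "" = pvNxtB g x ((k : Int) + (j : Int)) (row.getD j "") := by
  intro row
  induction row with
  | nil => intro k j hj; simp at hj
  | cons s rest ih =>
    intro k j hj
    cases j with
    | zero => simp [pvRowStep]
    | succ m =>
      simp only [pvRowStep, List.getD_cons_succ]
      have hc : ((k : Int)) + 1 = (((k + 1 : Nat)) : Int) := by push_cast; ring
      rw [hc, ih (k + 1) m (by simpa using hj)]
      congr 1
      push_cast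
      ring

theorem pvGridStep_getD (g : List (List String)) :
    ∀ (s : List (List String)) (k x : Nat), x < s.length →
      (pvGridStep g ((k : Int)) s).getD x [] = pvRowStep g ((k : Int) + (x : Int)) 0 (s.getD x []) := by
  intro s
  induction s with
  | nil => intro k x hx; simp at hx
  | cons row rest ih =>
    intro k x hx
    cases x with
    | zero => simp [pvGridStep]
    | succ m =>
      simp only [pvGridStep, List.getD_cons_succ]
      have hc : ((k : Int)) + 1 = (((k + 1 : Nat)) : Int) := by push_cast; ring
      rw [hc, ih (k + 1) m (by simpa using hx)]
      congr 1
      push_cast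
      ring

theorem pvStepB_eq (g : List (List String)) (hg : ∀ r ∈ g, r.length = (g.headD []).length) :
    pvStepB g = pvGridStep g 0 g := by
  rw [pvStepB_def]
  apply List.ext_getElem
  · rw [List.length_zipWith, pvCountsG_length, pvGridStep_length]
    omega
  · intro x h1 h2
    have hx : x < g.length := by rwa [pvGridStep_length] at h2
    have hcrow := pvCountsG_row g hg x hx
    have hrowlen : (g.getD x []).length = (g.headD []).length := pvRowLen hg hx
    have hclen : x < (pvCountsG g).length := by rw [pvCountsG_length]; exact hx
    have hc1 : (pvCountsG g)[x]'hclen = (pvCountsG g).getD x [] :=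
      (List.getD_eq_getElem _ [] hclen).symm
    have hg1 : g[x]'hx = g.getD x [] := (List.getD_eq_getElem g [] hx).symm
    rw [List.getElem_zipWith]
    have hgrid : (pvGridStep g ((0 : Int)) g)[x]'h2 = pvRowStep g ((x : Int)) 0 (g.getD x []) := by
      rw [← List.getD_eq_getElem _ [] h2,
          show ((0 : Int)) = (((0 : Nat)) : Int) by simp,
          pvGridStep_getD g g 0 x hx]
      norm_num
    rw [hgrid]
    apply List.ext_getElem
    · rw [List.length_zipWith, pvRowStep_length, hrowlen]
      simp only [hg1, hc1]
      rw [hrowlen, hcrow.1]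
      omega
    · intro y hy1 hy2
      have hyW : y < (g.headD []).length := by
        rwa [pvRowStep_length, hrowlen] at hy2
      have hyr : y < (g.getD x []).length := by omega
      rw [List.getElem_zipWith]
      simp only [hg1, hc1]
      rw [← List.getD_eq_getElem (g.getD x []) "" hyr,
          ← List.getD_eq_getElem ((pvCountsG g).getD x []) 0 (by rw [hcrow.1]; exact hyW),
          hcrow.2 y hyW,
          ← List.getD_eq_getElem (pvRowStep g ((x : Int)) 0 (g.getD x [])) "" hy2,
          show ((0 : Int)) = (((0 : Nat)) : Int) by simp,
          pvRowStep_getD g ((x : Int)) (g.getD x []) 0 y hyr]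
      norm_num [pvNxtB]

-- the convolution step preserves rectangularity
theorem pvPreStep (g : List (List String)) (hg : ∀ r ∈ g, r.length = (g.headD []).length) :
    ∀ r ∈ pvStepB g, r.length = ((pvStepB g).headD []).length := by
  rw [pvStepB_eq g hg]
  cases g with
  | nil => intro r hr; simp [pvGridStep] at hr
  | cons row rest =>
    intro r hr
    have hhead : ((pvGridStep (row :: rest) 0 (row :: rest)).headD []).length = row.length := by
      simp [pvGridStep, pvRowStep_length]
    rw [hhead]
    obtain ⟨i, hi, rfl⟩ := List.mem_iff_getElem.mp hr
    have hi' : i < (row :: rest).length := by rwa [pvGridStep_length] at hi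
    have hrow : (pvGridStep (row :: rest) 0 (row :: rest))[i]'hi
        = pvRowStep (row :: rest) ((i : Int)) 0 ((row :: rest).getD i []) := by
      rw [← List.getD_eq_getElem _ [] hi, show ((0 : Int)) = (((0 : Nat)) : Int) by simp,
          pvGridStep_getD _ _ 0 i hi']
      norm_num
    rw [hrow, pvRowStep_length]
    exact pvRowLen hg hi'

theorem pvCountOccEq (g : List (List String)) : pvCountOcc g = pvOccRows g := rfl

theorem pvLoopEq :
    ∀ (fuel : Nat) (input g : List (List String)) (cnt : Int),
      (∀ r ∈ g, r.length = (g.headD []).length) →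
      cnt = pvCountOcc g - pvCountOcc input →
      pvWhileA fuel g cnt = pvLoopB input fuel g := by
  intro fuel
  induction fuel with
  | zero => intro input g cnt hg hcnt; simp [pvWhileA, pvLoopB, hcnt]
  | succ n ih =>
    intro input g cnt hg hcnt
    have houter := pvOuterSpec g hg g 0 g false cnt rfl (by simp) (by simp)
    rw [show ((0 : Nat) : Int) = (0 : Int) by simp] at houter
    have hstep : pvGridStep g 0 g = pvStepB g := (pvStepB_eq g hg).symm
    rw [hstep, List.take_zero, List.nil_append, Bool.false_or] at houter
    simp only [pvWhileA, pvLoopB]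
    rw [houter]
    by_cases hchg : pvStepB g = g
    · rw [hchg]
      simp [pvCountOccEq, hcnt]
    · rw [decide_eq_true hchg, if_pos rfl]
      rw [if_neg hchg]
      exact ih input (pvStepB g) _ (pvPreStep g hg)
        (by rw [hcnt, pvCountOccEq g, pvCountOccEq (pvStepB g)]; ring)

theorem pvFinal (input : List (List String))
    (hpre : ∀ r ∈ input, r.length = (input.headD []).length) :
    get_occupied_seats input = get_occupied_seats_alt input := by
  rw [get_occupied_seats, get_occupied_seats_alt]
  exact pvLoopEq (pvFuel input) input input 0 hpre (by ring)

-- ===== VERDICT (by name: the statement is the Claim_ definition above) =====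
theorem get_occupied_seats_spec : Claim_equal_get_occupied_seats := by
  intro input _ hpre
  unfold Spec_get_occupied_seats
  exact pvFinal input hpre
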